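-- pv_equiv track=rewrite | github.com/joj-macho/Math-Science-Playground | catalan-numbers/catalan.py | generate_catalan_numbers
-- ===== SOURCE A (Python) =====
-- def calculate_catalan_number(n):
--     '''Calculate the nth Catalan number using the recursive formula.'''
--     # Base case: C_0 = 1
--     if n == 0:
--         return 1
--
--     catalan = 0
--     # Calculate the nth Catalan number using the recursive formula
--     for i in range(n):
--         catalan += calculate_catalan_number(i) * calculate_catalan_number(n - i - 1)
--
--     return catalan
--
-- def generate_catalan_numbers(start, end):
--     '''Generate Catalan numbers within a range.'''
--     # List to store Catalan Numbers
--     catalan_numbers = []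
--     # Initialize the counter for calculating Catalan numbers
--     i = 0
--
--     # Iterate to calculate Catalan numbers until they exceed the 'end' value
--     while True:
--         # Calculate the nth Catalan number using the recursive formula
--         catalan = calculate_catalan_number(i)
--         # Check if the calculated Catalan number exceeds the 'end' value
--         if catalan > end:
--             break
--         # Check if the Catalan number is within the specified range [start, end]
--         if catalan >= start:
--             catalan_numbers.append(catalan)
--
--         i += 1
--
--     return catalan_numbers
-- ===== SOURCE B (Python) =====
-- def generate_catalan_numbers(start, end):
--     '''Generate Catalan numbers within [start, end] using the incremental recurrence
--     C_{n+1} = C_n * 2*(2n+1) // (n+2) instead of the exponential double recursion.'''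
--     result = []
--     c = 1
--     n = 0
--     while c <= end:
--         if c >= start:
--             result.append(c)
--         c = c * 2 * (2 * n + 1) // (n + 2)
--         n += 1
--     return result
-- ===== Notes on version B (the rewrite author's own statement) =====
-- stated objective: faster
-- what changed: Replaces the exponential double-recursive convolution (recomputing every Catalan number from scratch each loop iteration) with a single loop maintaining the current Catalan number via the exact recurrence C_{n+1} = C_n*2*(2n+1)//(n+2).
import Mathlib
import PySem

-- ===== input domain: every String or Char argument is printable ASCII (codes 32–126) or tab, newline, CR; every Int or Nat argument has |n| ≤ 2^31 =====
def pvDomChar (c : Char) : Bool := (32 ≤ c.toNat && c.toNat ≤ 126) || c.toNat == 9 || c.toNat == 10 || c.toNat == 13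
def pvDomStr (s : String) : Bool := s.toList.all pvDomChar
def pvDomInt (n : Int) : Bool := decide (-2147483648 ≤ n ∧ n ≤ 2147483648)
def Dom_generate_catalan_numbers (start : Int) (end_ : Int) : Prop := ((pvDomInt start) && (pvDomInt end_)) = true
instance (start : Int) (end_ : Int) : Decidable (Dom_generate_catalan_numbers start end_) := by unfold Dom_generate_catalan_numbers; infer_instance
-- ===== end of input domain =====

-- B replaces A's exponential double-recursive Catalan computation by the incremental
-- recurrence C_{n+1} = C_n * 2*(2n+1) // (n+2), computing each number in O(1) from the last.


-- ===== PORT A =====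
-- calculate_catalan_number: the naive convolution recursion ('.attach' only carries the
-- membership fact needed for termination; the computation is identical).
def calcCatalanA : Nat → Nat
  | 0 => 1
  | n + 1 =>
    (List.range (n + 1)).attach.foldl
      (fun catalan i => catalan + calcCatalanA i.1 * calcCatalanA (n - i.1)) 0
decreasing_by
  · exact List.mem_range.mp i.2
  · exact Nat.lt_succ_of_le (Nat.sub_le n i.1)

-- the 'while True' loop; fuel 32 only makes the loop total — on the stated domain
-- (end_ ≤ 2^31 < catalan 20) the loop breaks long before the fuel runs out.
def loopA (start end_ : Int) : Nat → Nat → List Int → List Int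
  | 0, _, acc => acc
  | fuel + 1, i, acc =>
    let catalan : Int := (calcCatalanA i : Int)
    if catalan > end_ then acc
    else loopA start end_ fuel (i + 1)
      (if catalan ≥ start then acc ++ [catalan] else acc)

def generate_catalan_numbers (start : Int) (end_ : Int) : List Int :=
  loopA start end_ 32 0 []

-- ===== PORT B =====
-- incremental loop: c holds the current Catalan number, updated by the closed recurrence.
def loopB (start end_ : Int) : Nat → Int → Int → List Int → List Int
  | 0, _, _, result => result
  | fuel + 1, n, c, result =>
    if c ≤ end_ then
      loopB start end_ fuel (n + 1)
        (PySem.Int.floordiv (c * 2 * (2 * (n : Int) + 1)) ((n : Int) + 2))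
        (if c ≥ start then result ++ [c] else result)
    else result

def generate_catalan_numbers_alt (start : Int) (end_ : Int) : List Int :=
  loopB start end_ 32 0 1 []

-- ===== PRECONDITION & SPEC =====
def Spec_generate_catalan_numbers (start : Int) (end_ : Int) (out : List Int) : Prop := out = generate_catalan_numbers_alt start end_
instance (start : Int) (end_ : Int) (out : List Int) : Decidable (Spec_generate_catalan_numbers start end_ out) := by unfold Spec_generate_catalan_numbers; infer_instance

-- ===== CLAIM (what is proved, stated in full; the proofs are below) =====
def Claim_equal_generate_catalan_numbers : Prop := ∀ (start : Int) (end_ : Int), Dom_generate_catalan_numbers start end_ → Spec_generate_catalan_numbers start end_ (generate_catalan_numbers start end_)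

-- ===== LEMMAS AND PROOFS =====

-- list-sum form of a Finset.range sum.
theorem sum_list_range (g : Nat → Nat) (n : Nat) :
    ((List.range n).map g).sum = ∑ i ∈ Finset.range n, g i := by
  induction n with
  | zero => simp
  | succ n ihn =>
    rw [List.range_succ, Finset.sum_range_succ, List.map_append, List.sum_append, ihn]
    simp

-- A's recursion computes the Catalan numbers.
theorem calcCatalanA_eq_catalan (n : Nat) : calcCatalanA n = catalan n := by
  induction n using Nat.strong_induction_on with
  | _ n ih =>
    match n with
    | 0 => simp [calcCatalanA]
    | n + 1 =>
      have hfold : ∀ (l : List Nat) (a : Nat),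
          l.foldl (fun acc x => acc + calcCatalanA x * calcCatalanA (n - x)) a
            = a + (l.map fun x => calcCatalanA x * calcCatalanA (n - x)).sum := by
        intro l
        induction l with
        | nil => simp
        | cons y t iht => intro a; simp [iht, Nat.add_assoc]
      have hmap : ((List.range (n + 1)).map fun x => calcCatalanA x * calcCatalanA (n - x))
          = ((List.range (n + 1)).map fun x => catalan x * catalan (n - x)) := by
        apply List.map_congr_left
        intro i hi
        rw [ih i (List.mem_range.mp hi), ih (n - i) (Nat.lt_succ_of_le (Nat.sub_le n i))]
      rw [calcCatalanA,
        List.foldl_attach (f := fun acc x => acc + calcCatalanA x * calcCatalanA (n - x)),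
        hfold, hmap, zero_add, sum_list_range,
        Finset.sum_range (f := fun i => catalan i * catalan (n - i)), ← catalan_succ]

-- the product recurrence, from Mathlib's central-binomial facts.
theorem catalan_mul_step (n : Nat) :
    catalan n * 2 * (2 * n + 1) = (n + 2) * catalan (n + 1) := by
  have h1 := succ_mul_catalan_eq_centralBinom n
  have h2 := succ_mul_catalan_eq_centralBinom (n + 1)
  have h3 := Nat.succ_mul_centralBinom_succ n
  apply Nat.eq_of_mul_eq_mul_left (show 0 < n + 1 by omega)
  calc (n + 1) * (catalan n * 2 * (2 * n + 1))
      = 2 * (2 * n + 1) * ((n + 1) * catalan n) := by ring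
    _ = 2 * (2 * n + 1) * n.centralBinom := by rw [h1]
    _ = (n + 1) * (n + 1).centralBinom := h3.symm
    _ = (n + 1) * ((n + 1 + 1) * catalan (n + 1)) := by rw [h2]
    _ = (n + 1) * ((n + 2) * catalan (n + 1)) := by ring

-- B's floordiv update sends catalan n to catalan (n+1).
theorem floordiv_step (n : Nat) :
    PySem.Int.floordiv ((catalan n : Int) * 2 * (2 * (n : Int) + 1)) ((n : Int) + 2)
      = (catalan (n + 1) : Int) := by
  have hcast : (catalan n : Int) * 2 * (2 * (n : Int) + 1)
      = ((catalan n * 2 * (2 * n + 1) : Nat) : Int) := by push_cast; ring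
  have hdiv : ((n : Int) + 2) = ((n + 2 : Nat) : Int) := by push_cast; ring
  rw [hcast, hdiv, PySem.Int.floordiv_natCast, catalan_mul_step n,
    Nat.mul_div_cancel_left _ (show 0 < n + 2 by omega)]

-- the two loops agree step for step when B's c is the Catalan number A recomputes.
theorem loopA_eq_loopB (start end_ : Int) (fuel : Nat) :
    ∀ (i : Nat) (acc : List Int),
      loopA start end_ fuel i acc = loopB start end_ fuel i (catalan i : Int) acc := by
  induction fuel with
  | zero => intro i acc; rfl
  | succ fuel ih =>
    intro i acc
    rw [loopA, loopB, calcCatalanA_eq_catalan]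
    by_cases h : (catalan i : Int) ≤ end_
    · rw [if_neg (by omega), if_pos h, ih (i + 1), floordiv_step i]
      push_cast
      ring_nf
    · rw [if_pos (by omega), if_neg h]

-- ===== VERDICT (by name: the statement is the Claim_ definition above) =====
theorem generate_catalan_numbers_spec : Claim_equal_generate_catalan_numbers := by
  intro start end_ _
  unfold Spec_generate_catalan_numbers generate_catalan_numbers generate_catalan_numbers_alt
  simpa using loopA_eq_loopB start end_ 32 0 []
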